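-- pv_equiv track=rewrite | github.com/murfrosoft/thesis | bca.py | gaussian_noise_generator
-- ===== SOURCE A (Python) =====
-- def gaussian_noise_generator( maximum ):
--     sigma = 0
--     while sigma <= maximum:
--         yield sigma
--         if sigma == 0:
--             sigma = 1
--         elif sigma < 10:
--             sigma += 1
--         elif sigma < 50:
--             sigma += 5
--         elif sigma < 100:
--             sigma += 10
--         else:
--             sigma += 25
-- ===== SOURCE B (Python) =====
-- def gaussian_noise_generator(maximum):
--     # Closed form: compute the number of terms directly, then the i-th sigma by formula.
--     def nth(i):
--         if i <= 10:
--             return i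
--         if i <= 18:
--             return 10 + 5 * (i - 10)
--         if i <= 23:
--             return 50 + 10 * (i - 18)
--         return 100 + 25 * (i - 23)
--     if maximum < 0:
--         count = 0
--     elif maximum <= 10:
--         count = maximum + 1
--     elif maximum < 50:
--         count = 11 + (maximum - 10) // 5
--     elif maximum < 100:
--         count = 19 + (maximum - 50) // 10
--     else:
--         count = 24 + (maximum - 100) // 25
--     for i in range(count):
--         yield nth(i)
-- ===== Notes on version B (the rewrite author's own statement) =====
-- stated objective: alternative
-- what changed: Replaces A's step-by-step loop simulation (value-dependent if/elif increment ladder) by a closed form: the number of terms is computed arithmetically from maximum and the i-th sigma is produced directly by an index formula, with no running sigma state at all.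
import Mathlib
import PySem

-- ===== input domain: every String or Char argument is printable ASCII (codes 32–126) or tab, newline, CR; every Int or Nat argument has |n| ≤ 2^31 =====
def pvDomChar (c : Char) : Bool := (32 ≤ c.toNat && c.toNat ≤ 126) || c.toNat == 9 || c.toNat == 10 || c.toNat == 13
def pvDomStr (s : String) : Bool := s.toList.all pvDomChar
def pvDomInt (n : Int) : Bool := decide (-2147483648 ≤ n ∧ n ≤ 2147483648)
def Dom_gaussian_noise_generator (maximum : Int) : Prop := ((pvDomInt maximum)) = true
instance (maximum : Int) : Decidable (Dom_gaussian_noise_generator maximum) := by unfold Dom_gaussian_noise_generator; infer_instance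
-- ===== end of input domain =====

-- B replaces A's stateful loop (value-dependent if/elif increment ladder) by a closed form:
-- the number of terms is computed arithmetically from maximum and the i-th sigma by an index formula.

-- ===== PORT A =====
-- A's while loop: yield sigma, then update sigma via the if/elif ladder.
-- Nat fuel is a pure totality guard: sigma grows by at least 1 per yield, so (maximum+1).toNat suffices.
def gnLoopA (maximum : Int) : Nat → Int → List Int
  | 0, _ => []
  | fuel + 1, sigma =>
    if sigma ≤ maximum then
      sigma ::
        gnLoopA maximum fuel
          (if sigma = 0 then 1
           else if sigma < 10 then sigma + 1
           else if sigma < 50 then sigma + 5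
           else if sigma < 100 then sigma + 10
           else sigma + 25)
    else []

def gaussian_noise_generator (maximum : Int) : List Int :=
  gnLoopA maximum (maximum + 1).toNat 0

-- ===== PORT B =====
-- B's helper nth(i): the i-th sigma, by closed form.
def gnNth (i : Int) : Int :=
  if i ≤ 10 then i
  else if i ≤ 18 then 10 + 5 * (i - 10)
  else if i ≤ 23 then 50 + 10 * (i - 18)
  else 100 + 25 * (i - 23)

-- B's count: how many sigmas are ≤ maximum, by closed form.
def gnCount (maximum : Int) : Int :=
  if maximum < 0 then 0
  else if maximum ≤ 10 then maximum + 1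
  else if maximum < 50 then 11 + PySem.Int.floordiv (maximum - 10) 5
  else if maximum < 100 then 19 + PySem.Int.floordiv (maximum - 50) 10
  else 24 + PySem.Int.floordiv (maximum - 100) 25

def gaussian_noise_generator_alt (maximum : Int) : List Int :=
  (PySem.List.pyRange 0 (gnCount maximum) 1).map gnNth

-- ===== PRECONDITION & SPEC =====
def Spec_gaussian_noise_generator (maximum : Int) (out : List Int) : Prop := out = gaussian_noise_generator_alt maximum
instance (maximum : Int) (out : List Int) : Decidable (Spec_gaussian_noise_generator maximum out) := by unfold Spec_gaussian_noise_generator; infer_instance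

-- ===== CLAIM (what is proved, stated in full; the proofs are below) =====
def Claim_equal_gaussian_noise_generator : Prop := ∀ (maximum : Int), Dom_gaussian_noise_generator maximum → Spec_gaussian_noise_generator maximum (gaussian_noise_generator maximum)

-- ===== LEMMAS AND PROOFS =====

-- A's increment ladder advances nth i to nth (i+1).
lemma gnNth_step (i : Int) (hi : 0 ≤ i) :
    (if gnNth i = 0 then 1
     else if gnNth i < 10 then gnNth i + 1
     else if gnNth i < 50 then gnNth i + 5
     else if gnNth i < 100 then gnNth i + 10
     else gnNth i + 25) = gnNth (i + 1) := by
  simp only [gnNth]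
  split_ifs <;> omega

-- nth i ≤ m exactly when i < count m (for i ≥ 0).
lemma gnNth_le_iff (m i : Int) (hi : 0 ≤ i) : gnNth i ≤ m ↔ i < gnCount m := by
  have h5 : PySem.Int.floordiv (m - 10) 5 = (m - 10) / 5 :=
    PySem.Int.floordiv_eq_ediv_of_pos (by omega)
  have h10 : PySem.Int.floordiv (m - 50) 10 = (m - 50) / 10 :=
    PySem.Int.floordiv_eq_ediv_of_pos (by omega)
  have h25 : PySem.Int.floordiv (m - 100) 25 = (m - 100) / 25 :=
    PySem.Int.floordiv_eq_ediv_of_pos (by omega)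
  simp only [gnNth, gnCount, h5, h10, h25]
  split_ifs <;> omega

lemma gnCount_le (m : Int) : gnCount m ≤ (m + 1).toNat := by
  have h5 : PySem.Int.floordiv (m - 10) 5 = (m - 10) / 5 :=
    PySem.Int.floordiv_eq_ediv_of_pos (by omega)
  have h10 : PySem.Int.floordiv (m - 50) 10 = (m - 50) / 10 :=
    PySem.Int.floordiv_eq_ediv_of_pos (by omega)
  have h25 : PySem.Int.floordiv (m - 100) 25 = (m - 100) / 25 :=
    PySem.Int.floordiv_eq_ediv_of_pos (by omega)
  simp only [gnCount, h5, h10, h25]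
  split_ifs <;> omega

-- main invariant: from state nth i with enough fuel, A's loop yields nth i, nth (i+1), …, nth (count-1).
lemma gnLoopA_eq (m : Int) :
    ∀ (fuel : Nat) (i : Int), 0 ≤ i → gnCount m - i ≤ fuel →
      gnLoopA m fuel (gnNth i) = (PySem.List.pyRange i (gnCount m) 1).map gnNth := by
  intro fuel
  induction fuel with
  | zero =>
    intro i hi hf
    have hnil : PySem.List.pyRange i (gnCount m) 1 = [] := by
      have := PySem.List.length_pyRange_one i (gnCount m)
      exact List.eq_nil_of_length_eq_zero (by omega)
    rw [gnLoopA, hnil]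
    rfl
  | succ f ih =>
    intro i hi hf
    rw [gnLoopA]
    by_cases h : gnNth i ≤ m
    · have hlt : i < gnCount m := (gnNth_le_iff m i hi).mp h
      rw [if_pos h, PySem.List.pyRange_one_cons hlt, List.map_cons, gnNth_step i hi,
        ih (i + 1) (by omega) (by omega)]
    · have hge : ¬ i < gnCount m := fun hlt => h ((gnNth_le_iff m i hi).mpr hlt)
      have hnil : PySem.List.pyRange i (gnCount m) 1 = [] := by
        have := PySem.List.length_pyRange_one i (gnCount m)
        exact List.eq_nil_of_length_eq_zero (by omega)
      rw [if_neg h, hnil]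
      rfl

-- ===== VERDICT (by name: the statement is the Claim_ definition above) =====
theorem gaussian_noise_generator_spec : Claim_equal_gaussian_noise_generator := by
  intro maximum _
  unfold Spec_gaussian_noise_generator gaussian_noise_generator gaussian_noise_generator_alt
  have h := gnLoopA_eq maximum (maximum + 1).toNat 0 le_rfl
    (by have := gnCount_le maximum; omega)
  simpa [gnNth] using h
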